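-- pv_equiv track=rewrite | github.com/Dimikava/shg-thg-analysis-playground | _build_notebook.py | make_source
-- ===== SOURCE A (Python) =====
-- def make_source(text):
--     """Convert multiline text to Jupyter notebook source array format."""
--     if not text:
--         return [""]
--     lines = text.split('\n')
--     source = []
--     for i, line in enumerate(lines):
--         if i < len(lines) - 1:
--             source.append(line + '\n')
--         else:
--             if line:
--                 source.append(line)
--     return source if source else [""]
-- ===== SOURCE B (Python) =====
-- def make_source(text):
--     """Convert multiline text to Jupyter notebook source array format."""
--     source = []
--     buf = []
--     for ch in text:
--         buf.append(ch)
--         if ch == '\n':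
--             source.append(''.join(buf))
--             buf = []
--     if buf:
--         source.append(''.join(buf))
--     return source or [""]
-- ===== Notes on version B (the rewrite author's own statement) =====
-- stated objective: alternative
-- what changed: Replaced the newline-split followed by an enumerate loop with an index-vs-length comparison by a single character scan that accumulates the current line in a buffer and emits it when a newline character is seen (plus the leftover buffer at the end), so no line list and no index arithmetic exist.
import Mathlib
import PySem

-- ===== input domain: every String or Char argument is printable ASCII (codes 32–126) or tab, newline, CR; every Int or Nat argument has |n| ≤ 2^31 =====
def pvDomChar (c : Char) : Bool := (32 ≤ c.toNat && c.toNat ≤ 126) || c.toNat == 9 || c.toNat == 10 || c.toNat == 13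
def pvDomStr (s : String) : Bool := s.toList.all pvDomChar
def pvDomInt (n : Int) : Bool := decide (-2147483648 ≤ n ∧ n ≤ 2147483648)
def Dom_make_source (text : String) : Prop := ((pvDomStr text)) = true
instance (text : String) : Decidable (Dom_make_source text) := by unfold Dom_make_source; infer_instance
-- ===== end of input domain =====

-- B replaces the newline-split + enumerate/index loop by a single character scan with a line buffer; same O(n) cost, equivalence proved for all strings.


-- ===== PORT A =====
-- the loop body: i < len(lines)-1 → append line+'\n'; else append line iff nonempty
def msBodyA (n : Int) (src : List String) (p : Int × List Char) : List String :=
  if p.1 < n - 1 then src ++ [String.mk (p.2 ++ ['\n'])]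
  else if p.2 = [] then src else src ++ [String.mk p.2]

def make_source (text : String) : List String :=
  if text.toList = [] then [""]
  else
    let lines := PySem.Chars.splitOn text.toList ['\n']
    let source := (PySem.List.enumerate lines 0).foldl (msBodyA (lines.length : Int)) []
    if source = [] then [""] else source

-- ===== PORT B =====
-- the for-ch loop of Source B: buf grows; on '\n' the buffered line (incl. the newline) is appended
def msAltGo : List Char → List Char → List String → List String
  | [], buf, src => if buf = [] then src else src ++ [String.mk buf]
  | c :: rest, buf, src =>
      if c = '\n' then msAltGo rest [] (src ++ [String.mk (buf ++ [c])])
      else msAltGo rest (buf ++ [c]) src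

def make_source_alt (text : String) : List String :=
  let source := msAltGo text.toList [] []
  if source = [] then [""] else source

-- ===== PRECONDITION & SPEC =====
def Spec_make_source (text : String) (out : List String) : Prop := out = make_source_alt text
instance (text : String) (out : List String) : Decidable (Spec_make_source text out) := by unfold Spec_make_source; infer_instance

-- ===== CLAIM (what is proved, stated in full; the proofs are below) =====
def Claim_equal_make_source : Prop := ∀ (text : String), Dom_make_source text → Spec_make_source text (make_source text)

-- ===== LEMMAS AND PROOFS =====

-- splitOn.go with accumulators expressed through the plain call (cur prepends to the first piece, acc prepends reversed)
theorem go_shift (sep : List Char) : ∀ (fuel : Nat) (l cur : List Char) (acc : List (List Char)),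
    PySem.Chars.splitOn.go sep fuel l cur acc
      = acc.reverse ++ (PySem.Chars.splitOn.go sep fuel l [] []).modifyHead (cur.reverse ++ ·) := by
  intro fuel
  induction fuel with
  | zero =>
    intro l cur acc
    simp [PySem.Chars.splitOn.go]
  | succ fuel ih =>
    intro l cur acc
    cases l with
    | nil => simp [PySem.Chars.splitOn.go]
    | cons c rest =>
      by_cases h : List.isPrefixOf sep (c :: rest) = true
      · rw [show PySem.Chars.splitOn.go sep (fuel+1) (c::rest) cur acc
              = PySem.Chars.splitOn.go sep fuel (List.drop sep.length (c::rest)) [] (cur.reverse :: acc) by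
            simp [PySem.Chars.splitOn.go, h],
          show PySem.Chars.splitOn.go sep (fuel+1) (c::rest) [] []
              = PySem.Chars.splitOn.go sep fuel (List.drop sep.length (c::rest)) [] [[]] by
            simp [PySem.Chars.splitOn.go, h]]
        rw [ih, ih (List.drop sep.length (c::rest)) [] [[]]]
        generalize PySem.Chars.splitOn.go sep fuel (List.drop sep.length (c::rest)) [] [] = G
        cases G <;> simp [List.modifyHead]
      · rw [show PySem.Chars.splitOn.go sep (fuel+1) (c::rest) cur acc
              = PySem.Chars.splitOn.go sep fuel rest (c :: cur) acc by
            simp [PySem.Chars.splitOn.go, h],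
          show PySem.Chars.splitOn.go sep (fuel+1) (c::rest) [] []
              = PySem.Chars.splitOn.go sep fuel rest [c] [] by
            simp [PySem.Chars.splitOn.go, h]]
        rw [ih rest (c::cur) acc, ih rest [c] []]
        generalize PySem.Chars.splitOn.go sep fuel rest [] [] = G
        cases G <;> simp [List.modifyHead]

theorem splitOn_nil : PySem.Chars.splitOn [] ['\n'] = [[]] := by decide

theorem splitOn_go_ne_nil : ∀ (fuel : Nat) (l cur : List Char) (acc : List (List Char)),
    PySem.Chars.splitOn.go ['\n'] fuel l cur acc ≠ [] := by
  intro fuel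
  induction fuel with
  | zero => intro l cur acc; simp [PySem.Chars.splitOn.go]
  | succ fuel ih =>
    intro l cur acc
    cases l with
    | nil => simp [PySem.Chars.splitOn.go]
    | cons c rest =>
      by_cases h : List.isPrefixOf ['\n'] (c :: rest) = true
      · simpa [PySem.Chars.splitOn.go, h] using ih _ _ _
      · simpa [PySem.Chars.splitOn.go, h] using ih _ _ _

theorem splitOn_ne_nil (s : List Char) : PySem.Chars.splitOn s ['\n'] ≠ [] := by
  simpa [PySem.Chars.splitOn] using splitOn_go_ne_nil _ _ _ _

theorem splitOn_cons_nl (r : List Char) :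
    PySem.Chars.splitOn ('\n' :: r) ['\n'] = [] :: PySem.Chars.splitOn r ['\n'] := by
  show PySem.Chars.splitOn.go ['\n'] (('\n'::r).length + 1) ('\n'::r) [] [] = _
  rw [show PySem.Chars.splitOn.go ['\n'] (('\n'::r).length + 1) ('\n'::r) [] []
        = PySem.Chars.splitOn.go ['\n'] (r.length + 1) r [] [[]] by
      simp [PySem.Chars.splitOn.go, List.isPrefixOf]]
  rw [go_shift, show PySem.Chars.splitOn r ['\n']
        = PySem.Chars.splitOn.go ['\n'] (r.length + 1) r [] [] from rfl]
  generalize PySem.Chars.splitOn.go ['\n'] (r.length + 1) r [] [] = G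
  cases G <;> simp [List.modifyHead]

theorem splitOn_cons_ne (c : Char) (r : List Char) (h : c ≠ '\n') :
    PySem.Chars.splitOn (c :: r) ['\n'] = (PySem.Chars.splitOn r ['\n']).modifyHead (c :: ·) := by
  show PySem.Chars.splitOn.go ['\n'] ((c::r).length + 1) (c::r) [] [] = _
  rw [show PySem.Chars.splitOn.go ['\n'] ((c::r).length + 1) (c::r) [] []
        = PySem.Chars.splitOn.go ['\n'] (r.length + 1) r [c] [] by
      simp only [PySem.Chars.splitOn.go, List.isPrefixOf, List.length_cons]
      rw [if_neg]
      intro hif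
      rw [Bool.and_eq_true, beq_iff_eq] at hif
      exact h hif.1.symm]
  rw [go_shift]
  simp [PySem.Chars.splitOn]

-- clean recursive reading of A's loop: all but the last piece get '\n', the last iff nonempty
def procA : List (List Char) → List String
  | [] => []
  | [l] => if l = [] then [] else [String.mk l]
  | l :: l' :: ls => String.mk (l ++ ['\n']) :: procA (l' :: ls)

theorem loopA (n : Int) : ∀ (ls : List (List Char)) (s : Int) (src : List String),
    s + ls.length = n →
    (PySem.List.enumerate ls s).foldl (msBodyA n) src = src ++ procA ls := by
  intro ls
  induction ls with
  | nil => intro s src h; simp [PySem.List.enumerate_nil, procA]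
  | cons l ls ih =>
    intro s src h
    rw [PySem.List.enumerate_cons, List.foldl_cons]
    cases ls with
    | nil =>
      have hs : s = n - 1 := by simp at h; omega
      simp [PySem.List.enumerate_nil, msBodyA, hs, procA]
      split <;> simp
    | cons l' ls' =>
      have hlt : s < n - 1 := by simp at h; omega
      rw [ih (s + 1) _ (by simp at h ⊢; omega)]
      simp [msBodyA, hlt, procA]

-- Source B's loop with the source accumulator pulled out front
theorem msAltGo_acc : ∀ (cs buf : List Char) (src : List String),
    msAltGo cs buf src = src ++ msAltGo cs buf [] := by
  intro cs
  induction cs with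
  | nil => intro buf src; simp only [msAltGo]; split <;> simp
  | cons c rest ih =>
    intro buf src
    simp only [msAltGo]
    split
    · rw [ih [] (src ++ _), ih [] ([] ++ _)]
      simp
    · exact ih (buf ++ [c]) src

-- the char scan computes A's per-line processing of split('\n'), with buf prefixed to the first piece
theorem msAltGo_eq : ∀ (cs buf : List Char),
    msAltGo cs buf [] = procA ((PySem.Chars.splitOn cs ['\n']).modifyHead (buf ++ ·)) := by
  intro cs
  induction cs with
  | nil =>
    intro buf
    simp only [msAltGo, splitOn_nil, List.modifyHead, procA, List.append_nil]
    split <;> simp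
  | cons c rest ih =>
    intro buf
    by_cases hc : c = '\n'
    · subst hc
      simp only [msAltGo, splitOn_cons_nl, List.modifyHead]
      rw [msAltGo_acc, ih []]
      have hne := splitOn_ne_nil rest
      cases hG : PySem.Chars.splitOn rest ['\n'] with
      | nil => exact absurd hG hne
      | cons a as => simp [List.modifyHead, procA]
    · simp only [msAltGo, if_neg hc, splitOn_cons_ne c rest hc]
      rw [ih (buf ++ [c])]
      cases hG : PySem.Chars.splitOn rest ['\n'] with
      | nil => exact absurd hG (splitOn_ne_nil rest)
      | cons a as => simp [List.modifyHead]

-- ===== VERDICT (by name: the statement is the Claim_ definition above) =====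
theorem make_source_spec : Claim_equal_make_source := by
  intro text _
  show make_source text = make_source_alt text
  unfold make_source make_source_alt
  cases hcs : text.toList with
  | nil => simp [msAltGo]
  | cons c rest =>
    simp only [reduceCtorEq, if_false]
    rw [loopA _ _ 0 [] (by simp), msAltGo_acc, msAltGo_eq]
    have hne := splitOn_ne_nil (c :: rest)
    cases hG : PySem.Chars.splitOn (c :: rest) ['\n'] with
    | nil => exact absurd hG hne
    | cons a as => simp [List.modifyHead]
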